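-- pv_equiv track=rewrite | github.com/a7393594/ai-trainer-platform | ai-engine/app/core/pipeline/handlers/branch.py | _collect_downstream
-- ===== SOURCE A (Python) =====
-- def _collect_downstream(start_node_id: str, edges: list[dict]) -> set[str]:
--     """BFS from `start_node_id` over edges. Returns set of all reachable downstream node_ids."""
--     out: set[str] = set()
--     queue = [start_node_id]
--     while queue:
--         cur = queue.pop()
--         for e in edges:
--             if e.get("from") == cur:
--                 dst = e.get("to")
--                 if dst and dst not in out:
--                     out.add(dst)
--                     queue.append(dst)
--     return out
-- ===== SOURCE B (Python) =====
-- def _collect_downstream(start_node_id: str, edges: list[dict]) -> set[str]: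
--     """Index the edges into an adjacency dict once, then traverse with a
--     stack over dict lookups instead of rescanning the edge list per node."""
--     pairs = []
--     for e in edges:
--         src = e.get("from")
--         dst = e.get("to")
--         if src is not None and dst:
--             pairs.append((src, dst))
--     adj = {}
--     for src, dst in pairs:
--         adj.setdefault(src, []).append(dst)
--     out: set[str] = set()
--     stack = [start_node_id]
--     while stack:
--         cur = stack.pop()
--         for dst in adj.get(cur, []):
--             if dst not in out:
--                 out.add(dst)
--                 stack.append(dst)
--     return out
-- ===== Notes on version B (the rewrite author's own statement) =====
-- stated objective: alternative
-- what changed: B builds an adjacency dict from the edge list once and then runs the stack traversal over dict lookups, instead of rescanning the entire edge list for every popped node.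
import Mathlib
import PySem

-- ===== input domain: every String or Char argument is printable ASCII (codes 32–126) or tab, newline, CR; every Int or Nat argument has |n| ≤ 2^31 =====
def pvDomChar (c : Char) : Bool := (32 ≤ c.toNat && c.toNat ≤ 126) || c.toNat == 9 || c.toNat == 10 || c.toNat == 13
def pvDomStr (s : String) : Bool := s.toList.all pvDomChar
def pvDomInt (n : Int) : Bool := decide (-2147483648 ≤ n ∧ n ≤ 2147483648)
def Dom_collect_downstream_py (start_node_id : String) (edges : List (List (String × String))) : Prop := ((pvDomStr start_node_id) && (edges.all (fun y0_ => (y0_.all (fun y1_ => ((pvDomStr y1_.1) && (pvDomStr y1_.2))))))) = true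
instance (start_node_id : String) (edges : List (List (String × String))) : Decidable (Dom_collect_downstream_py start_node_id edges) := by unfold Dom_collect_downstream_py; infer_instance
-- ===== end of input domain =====

-- B indexes the edges into an adjacency dict once and traverses over dict lookups instead of rescanning the whole edge list per popped node (objective: alternative).
-- Python's `e.get(k)` on an edge dict:
def pvEdgeGet (e : List (String × String)) (k : String) : Option String :=
  (PySem.Dict.ofList e).get? k

-- ===== PORT A =====
-- body of A's inner `for e in edges:` loop, for the current node `cur`; state = (out, queue)
def pvAStep (cur : String) (st : PySem.Set String × List String) (e : List (String × String)) :
    PySem.Set String × List String :=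
  if pvEdgeGet e "from" == some cur then
    match pvEdgeGet e "to" with
    | some dst =>
        if dst != "" && !(PySem.Set.contains st.1 dst) then
          (PySem.Set.add st.1 dst, st.2 ++ [dst])
        else st
    | none => st
  else st

-- A's `while queue:` loop; the fuel is only a termination guard (2*|edges|+2 always suffices)
def pvALoop (edges : List (List (String × String))) :
    Nat → PySem.Set String → List String → List String
  | 0, out, _ => out
  | fuel+1, out, queue =>
    match queue.getLast? with
    | none => out
    | some cur =>
      let st := edges.foldl (pvAStep cur) (out, queue.dropLast)
      pvALoop edges fuel st.1 st.2

def collect_downstream_py (start_node_id : String) (edges : List (List (String × String))) : List String :=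
  pvALoop edges (2 * edges.length + 2) PySem.Set.empty [start_node_id]

-- ===== PORT B =====
-- the (src, dst) pairs B keeps: edges with a "from" key and a truthy "to" value
def pvBPairs (edges : List (List (String × String))) : List (String × String) :=
  edges.filterMap (fun e =>
    match pvEdgeGet e "from", pvEdgeGet e "to" with
    | some src, some dst => if dst != "" then some (src, dst) else none
    | _, _ => none)

-- adj: for src, dst in pairs: adj.setdefault(src, []).append(dst)
def pvBAdj (edges : List (List (String × String))) : PySem.Dict String (List String) :=
  (pvBPairs edges).foldl (fun d p => d.modify p.1 [] (· ++ [p.2])) PySem.Dict.empty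

-- body of B's `for dst in adj.get(cur, []):` loop; state = (out, stack)
def pvBStep (st : PySem.Set String × List String) (dst : String) :
    PySem.Set String × List String :=
  if !(PySem.Set.contains st.1 dst) then (PySem.Set.add st.1 dst, st.2 ++ [dst]) else st

-- B's `while stack:` loop; same fuel guard
def pvBLoop (adj : PySem.Dict String (List String)) :
    Nat → PySem.Set String → List String → List String
  | 0, out, _ => out
  | fuel+1, out, stack =>
    match stack.getLast? with
    | none => out
    | some cur =>
      let st := (adj.getD cur []).foldl pvBStep (out, stack.dropLast)
      pvBLoop adj fuel st.1 st.2

def collect_downstream_py_alt (start_node_id : String) (edges : List (List (String × String))) : List String :=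
  pvBLoop (pvBAdj edges) (2 * edges.length + 2) PySem.Set.empty [start_node_id]

-- ===== PRECONDITION & SPEC =====
def Spec_collect_downstream_py (start_node_id : String) (edges : List (List (String × String))) (out : List String) : Prop := out = collect_downstream_py_alt start_node_id edges
instance (start_node_id : String) (edges : List (List (String × String))) (out : List String) : Decidable (Spec_collect_downstream_py start_node_id edges out) := by unfold Spec_collect_downstream_py; infer_instance

-- ===== CLAIM (what is proved, stated in full; the proofs are below) =====
def Claim_equal_collect_downstream_py : Prop := ∀ (start_node_id : String) (edges : List (List (String × String))), Dom_collect_downstream_py start_node_id edges → Spec_collect_downstream_py start_node_id edges (collect_downstream_py start_node_id edges)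

-- ===== LEMMAS AND PROOFS =====

-- B's adjacency lookup returns exactly the dst's of the kept pairs whose src is cur, in order
theorem pvBAdj_getD (edges : List (List (String × String))) (cur : String) :
    (pvBAdj edges).getD cur [] =
      ((pvBPairs edges).filter (fun p => p.1 == cur)).map (·.2) := by
  unfold pvBAdj
  rw [PySem.Dict.getD_foldl_modify_append]
  simp

-- processing one node: A's scan of all edges equals B's fold over its adjacency list
theorem pvStep_eq (edges : List (List (String × String))) (cur : String) :
    ∀ st : PySem.Set String × List String,
      edges.foldl (pvAStep cur) st =
        (((pvBPairs edges).filter (fun p => p.1 == cur)).map (·.2)).foldl pvBStep st := by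
  induction edges with
  | nil => intro st; rfl
  | cons e rest ih =>
    intro st
    rw [List.foldl_cons]
    cases hf : pvEdgeGet e "from" with
    | none =>
      have hstep : pvAStep cur st e = st := by simp [pvAStep, hf]
      have hpairs : pvBPairs (e :: rest) = pvBPairs rest := by
        cases ht : pvEdgeGet e "to" <;> simp [pvBPairs, hf, ht]
      rw [hstep, hpairs, ih]
    | some src =>
      cases ht : pvEdgeGet e "to" with
      | none =>
        have hstep : pvAStep cur st e = st := by simp [pvAStep, hf, ht]
        have hpairs : pvBPairs (e :: rest) = pvBPairs rest := by
          simp [pvBPairs, hf, ht]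
        rw [hstep, hpairs, ih]
      | some dst =>
        by_cases hd : dst = ""
        · have hstep : pvAStep cur st e = st := by simp [pvAStep, hf, ht, hd]
          have hpairs : pvBPairs (e :: rest) = pvBPairs rest := by
            simp [pvBPairs, hf, ht, hd]
          rw [hstep, hpairs, ih]
        · have hpairs : pvBPairs (e :: rest) = (src, dst) :: pvBPairs rest := by
            simp [pvBPairs, hf, ht, hd]
          rw [hpairs]
          by_cases hs : src = cur
          · have hstep : pvAStep cur st e = pvBStep st dst := by
              simp [pvAStep, pvBStep, hf, ht, hd, hs]
            rw [List.filter_cons_of_pos (by simp [hs]), List.map_cons,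
              List.foldl_cons, hstep, ih]
          · have hstep : pvAStep cur st e = st := by simp [pvAStep, hf, hs]
            rw [List.filter_cons_of_neg (by simp [hs]), hstep, ih]

-- the two while-loops run in lockstep
theorem pvLoop_eq (edges : List (List (String × String))) :
    ∀ (fuel : Nat) (out : PySem.Set String) (queue : List String),
      pvALoop edges fuel out queue = pvBLoop (pvBAdj edges) fuel out queue := by
  intro fuel
  induction fuel with
  | zero => intro out queue; rfl
  | succ n ih =>
    intro out queue
    simp only [pvALoop, pvBLoop]
    cases queue.getLast? with
    | none => rfl
    | some cur =>
      dsimp only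
      rw [pvBAdj_getD, ← pvStep_eq]
      exact ih _ _

-- ===== VERDICT (by name: the statement is the Claim_ definition above) =====
theorem collect_downstream_py_spec : Claim_equal_collect_downstream_py := by
  intro s edges _
  unfold Spec_collect_downstream_py collect_downstream_py collect_downstream_py_alt
  exact pvLoop_eq edges _ _ _
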